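-- pv_equiv track=rewrite | github.com/scatterfish/advent-of-code-2018 | solutions/05-alchemical-reduction-PYTHON/main_list_concat.py | react_polymer_chain
-- ===== SOURCE A (Python) =====
-- def react_polymer_chain(chain):
-- 	i = 0
-- 	while i < len(chain) - 1:
-- 		if chain[i] != chain[i + 1] and chain[i].lower() == chain[i + 1].lower():
-- 			chain = chain[:i] + chain[i + 2:]
-- 			if i != 0:
-- 				i -= 1
-- 		else:
-- 			i += 1
-- 	return chain
-- ===== SOURCE B (Python) =====
-- def react_polymer_chain(chain):
--     stack = []
--     for c in chain:
--         if stack and stack[-1] != c and stack[-1].lower() == c.lower():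
--             stack.pop()
--         else:
--             stack.append(c)
--     return ''.join(stack)
-- ===== Notes on version B (the rewrite author's own statement) =====
-- stated objective: faster
-- what changed: Replaces the index-backtracking loop with repeated string slicing/concatenation by a single left-to-right pass maintaining a stack that pops when the next unit annihilates the top.
import Mathlib
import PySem

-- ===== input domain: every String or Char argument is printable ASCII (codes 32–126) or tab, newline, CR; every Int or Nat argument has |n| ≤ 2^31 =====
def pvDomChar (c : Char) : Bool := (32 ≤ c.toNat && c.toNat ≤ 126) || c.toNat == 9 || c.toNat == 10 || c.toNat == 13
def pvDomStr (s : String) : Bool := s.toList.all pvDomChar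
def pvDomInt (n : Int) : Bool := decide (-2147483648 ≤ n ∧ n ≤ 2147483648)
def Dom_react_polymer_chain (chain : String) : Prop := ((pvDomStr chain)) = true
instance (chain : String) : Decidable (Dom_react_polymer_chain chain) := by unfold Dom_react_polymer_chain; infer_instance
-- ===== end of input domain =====

-- B replaces A's quadratic index-backtracking slice-and-concatenate loop with a single
-- linear stack pass (push each unit, pop when it annihilates the top); same return value.

-- ===== PORT A =====
-- chain[i] != chain[i+1] and chain[i].lower() == chain[i+1].lower() on two single chars
def pvReact (a b : Char) : Bool := (a != b) && (PySem.Chars.lowerChar a == PySem.Chars.lowerChar b)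

-- the while loop of A over the string's characters; i is Python's i (always ≥ 0: it starts
-- at 0 and is decremented only when nonzero, so Nat subtraction `i - 1` is exact);
-- chain[:i] + chain[i+2:] with 0 ≤ i is exactly take i ++ drop (i+2) (PySem.List.slice_to_natCast /
-- slice_from_natCast).  `fuel` is only a structural totality guard: every step either raises i
-- or shortens the chain, so 2*len(chain)+1 steps always reach the loop's own exit condition
-- (pv_main below is applied with exactly that fuel and never uses the fuel-0 branch on it).
def pvLoopA : Nat → List Char → Nat → List Char
  | 0, chain, _ => chain
  | fuel + 1, chain, i =>
    if h : i + 1 < chain.length then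
      if pvReact chain[i] chain[i + 1] then
        pvLoopA fuel (chain.take i ++ chain.drop (i + 2)) (i - 1)
      else
        pvLoopA fuel chain (i + 1)
    else
      chain

def react_polymer_chain (chain : String) : String :=
  String.ofList (pvLoopA (2 * chain.toList.length + 1) chain.toList 0)

-- ===== PORT B =====
-- the for loop of B: stack kept top-first (Python's stack[-1] is the head here)
def pvLoopB (stack : List Char) (cs : List Char) : List Char :=
  match cs with
  | [] => stack
  | c :: rest =>
    match stack with
    | [] => pvLoopB [c] rest
    | t :: s => if pvReact t c then pvLoopB s rest else pvLoopB (c :: t :: s) rest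

-- ''.join(stack) reads the stack bottom-to-top, i.e. the reverse of our top-first list
def react_polymer_chain_alt (chain : String) : String :=
  String.ofList (pvLoopB [] chain.toList).reverse

-- ===== PRECONDITION & SPEC =====
def Spec_react_polymer_chain (chain : String) (out : String) : Prop := out = react_polymer_chain_alt chain
instance (chain : String) (out : String) : Decidable (Spec_react_polymer_chain chain out) := by unfold Spec_react_polymer_chain; infer_instance

-- ===== CLAIM (what is proved, stated in full; the proofs are below) =====
def Claim_equal_react_polymer_chain : Prop := ∀ (chain : String), Dom_react_polymer_chain chain → Spec_react_polymer_chain chain (react_polymer_chain chain)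

-- ===== LEMMAS AND PROOFS =====

-- reversing take (k+1) exposes chain[k] as the stack top
lemma pv_take_succ_reverse (chain : List Char) (k : Nat) (hk : k < chain.length) :
    (chain.take (k + 1)).reverse = chain[k] :: (chain.take k).reverse := by
  rw [List.take_add_one, List.getElem?_eq_getElem hk]
  simp

-- pushing chain[k] onto the stack holding the (irreducible) first k units
lemma pv_push_step (chain : List Char) (k : Nat) (rest : List Char) (hk : k < chain.length)
    (hinv : ∀ j, (h : j + 1 < chain.length) → j + 1 ≤ k → pvReact chain[j] chain[j+1] = false) :
    pvLoopB ((chain.take k).reverse) (chain[k] :: rest)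
      = pvLoopB ((chain.take (k + 1)).reverse) rest := by
  rw [pv_take_succ_reverse chain k hk]
  cases k with
  | zero => simp [pvLoopB]
  | succ m =>
      rw [pv_take_succ_reverse chain m (by omega)]
      have hfalse : pvReact chain[m] chain[m+1] = false := hinv m (by omega) (by omega)
      simp [pvLoopB, hfalse]

-- when A's loop has exited (no pair left to look at), the stack pass absorbs the at most
-- one remaining unit and returns the chain unchanged
lemma pv_exit (chain : List Char) (i : Nat) (h : ¬ i + 1 < chain.length) (hi : i ≤ chain.length)
    (hinv : ∀ j, (h' : j + 1 < chain.length) → j + 1 ≤ i → pvReact chain[j] chain[j+1] = false) :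
    chain = (pvLoopB ((chain.take i).reverse) (chain.drop i)).reverse := by
  rcases Nat.lt_or_ge i chain.length with hlt | hge
  · -- i = chain.length - 1: one unit left to push
    have hdrop1 : chain.drop (i+1) = [] := List.drop_of_length_le (by omega)
    rw [List.drop_eq_getElem_cons hlt, hdrop1,
      pv_push_step chain i [] hlt (fun j hj hjm => hinv j hj (by omega))]
    have htk : chain.take (i+1) = chain := List.take_of_length_le (by omega)
    rw [htk]
    simp [pvLoopB]
  · -- i ≥ length: nothing left to read
    rw [List.drop_of_length_le hge, List.take_of_length_le hge]
    simp [pvLoopB]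

-- loop correspondence: A's state (chain, i) with the first i units irreducible matches
-- the stack pass with the first i units on the stack and the rest still to read
lemma pv_main (fuel : Nat) : ∀ (chain : List Char) (i : Nat),
    2 * chain.length ≤ i + fuel → i ≤ chain.length →
    (∀ j, (h : j + 1 < chain.length) → j + 1 ≤ i → pvReact chain[j] chain[j+1] = false) →
    pvLoopA fuel chain i = (pvLoopB ((chain.take i).reverse) (chain.drop i)).reverse := by
  induction fuel with
  | zero =>
      intro chain i hf hi hinv
      have h : ¬ i + 1 < chain.length := by omega
      simpa only [pvLoopA] using pv_exit chain i h hi hinv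
  | succ f ih =>
      intro chain i hf hi hinv
      simp only [pvLoopA]
      by_cases h : i + 1 < chain.length
      · rw [dif_pos h]
        by_cases hr : pvReact (chain[i]'(by omega)) (chain[i+1]'(by omega)) = true
        · -- reacting pair at (i, i+1): A removes it and steps back
          rw [if_pos hr]
          have hdropi : chain.drop i = chain[i] :: chain[i+1] :: chain.drop (i + 2) := by
            rw [List.drop_eq_getElem_cons (by omega), List.drop_eq_getElem_cons (by omega)]
          set nc := chain.take i ++ chain.drop (i + 2) with hnc
          have hnclen : nc.length = chain.length - 2 := by
            simp [hnc, List.length_take]; omega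
          have hncget : ∀ j, (hj : j < i) → nc[j]'(by omega) = chain[j]'(by omega) := by
            intro j hj
            simp [hnc, List.length_take, hj, hj.trans_le hi, List.getElem_take]
          have hinv' : ∀ j, (h' : j + 1 < nc.length) → j + 1 ≤ i - 1 →
              pvReact (nc[j]) (nc[j+1]) = false := by
            intro j hj hji
            have e1 : nc[j]'(by omega) = chain[j]'(by omega) := hncget j (by omega)
            have e2 : nc[j+1]'(by omega) = chain[j+1]'(by omega) := hncget (j+1) (by omega)
            rw [e1, e2]
            exact hinv j (by omega) (by omega)
          rw [ih nc (i-1) (by omega) (by omega) hinv']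
          rcases Nat.eq_zero_or_pos i with hz | hpos
          · subst hz
            have hchain : chain = chain[0] :: chain[0+1] :: chain.drop (0+2) := by
              simpa using hdropi
            show (pvLoopB ((nc.take (0-1)).reverse) (nc.drop (0-1))).reverse
              = (pvLoopB (((chain.take 0).reverse)) (chain.drop 0)).reverse
            conv_rhs => rw [List.take_zero, List.drop_zero, hchain]
            simp only [hnc, List.take_zero, List.nil_append, Nat.zero_sub, List.drop_zero,
              List.reverse_nil]
            simp [pvLoopB, hr]
          · obtain ⟨m, rfl⟩ : ∃ m, i = m + 1 := ⟨i - 1, by omega⟩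
            simp only [Nat.add_sub_cancel]
            have hlt1 : (chain.take (m+1)).length = m + 1 := by
              simp only [List.length_take]; omega
            have hlm : (chain.take m).length = m := by
              simp only [List.length_take]; omega
            have htake_eq : nc.take m = chain.take m := by
              rw [hnc, List.take_append, hlt1]
              have h1 : m - (m+1) = 0 := by omega
              simp [List.take_take, h1]
            have hsplit : chain.take (m+1) = chain.take m ++ [chain[m]'(by omega)] := by
              rw [List.take_add_one, List.getElem?_eq_getElem (by omega : m < chain.length)]
              simp
            have hdrop_eq : nc.drop m = chain[m]'(by omega) :: chain.drop (m + 1 + 2) := by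
              rw [hnc, hsplit, List.append_assoc, List.drop_append, hlm,
                List.drop_of_length_le (le_of_eq hlm)]
              simp
            rw [htake_eq, hdrop_eq]
            rw [pv_push_step chain m _ (by omega) (fun j hj hjm => hinv j hj (by omega))]
            rw [hdropi]
            rw [pv_push_step chain (m+1) _ (by omega) (fun j hj hjm => hinv j hj (by omega))]
            rw [pv_take_succ_reverse chain (m+1) (by omega)]
            simp only [pvLoopB, hr, if_pos]
        · -- no reaction: A moves on to the next pair
          rw [if_neg hr]
          have hinv' : ∀ j, (h' : j + 1 < chain.length) → j + 1 ≤ i + 1 →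
              pvReact (chain[j]) (chain[j+1]) = false := by
            intro j hj hji
            rcases Nat.lt_or_ge (j+1) (i+1) with hlt | hge
            · exact hinv j hj (by omega)
            · have : j = i := by omega
              subst this
              exact Bool.not_eq_true _ |>.mp hr
          rw [ih chain (i+1) (by omega) (by omega) hinv']
          rw [List.drop_eq_getElem_cons (by omega : i < chain.length)]
          rw [pv_push_step chain i _ (by omega) (fun j hj hjm => hinv j hj (by omega))]
      · rw [dif_neg h]
        exact pv_exit chain i h hi hinv

-- ===== VERDICT (by name: the statement is the Claim_ definition above) =====
theorem react_polymer_chain_spec : Claim_equal_react_polymer_chain := by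
  intro chain _
  unfold Spec_react_polymer_chain react_polymer_chain react_polymer_chain_alt
  rw [pv_main (2 * chain.toList.length + 1) chain.toList 0 (by omega) (by omega)
    (by intro j h hj; omega)]
  simp
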